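-- pv_equiv track=rewrite | github.com/vsanni/jumble | jumble/text_manipulation.py | tokens
-- ===== SOURCE A (Python) =====
-- def tokens(cmd, separator=" ", string_char="\"", comment_char="#"):
--     open_  = False
--     space  = False
--     l      = []
--     s      = ""
--
--     for c in cmd:
--        if c == comment_char and not open_:
--            break
--
--        elif space and not open_ and c == separator:
--            pass
--
--        else:
--            if c == string_char: open_ ^= True
--            space = True if c == separator  else False
--
--            if open_ and space         : s+=c
--            if open_ and not space     : s+=c
--            if not open_ and space     : s, l = "", l+[s]
--            if not open_ and not space : s += c
--
--     return l+[s]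
-- ===== SOURCE B (Python) =====
-- def tokens(cmd, separator=" ", string_char="\"", comment_char="#"):
--     # pass 1: truncate cmd at the first comment_char that occurs outside quotes
--     open_ = False
--     eff = []
--     for c in cmd:
--         if c == comment_char and not open_:
--             break
--         eff.append(c)
--         if c == string_char:
--             open_ = not open_
--     # pass 2: cut eff into slices at separators outside quotes, skipping separator runs
--     out = []
--     i, n = 0, len(eff)
--     while True:
--         j = i
--         open_ = False
--         while j < n and not (eff[j] == separator and not open_):
--             if eff[j] == string_char:
--                 open_ = not open_
--             j += 1
--         out.append("".join(eff[i:j]))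
--         if j == n:
--             return out
--         j += 1
--         while j < n and eff[j] == separator:
--             j += 1
--         i = j
-- ===== Notes on version B (the rewrite author's own statement) =====
-- stated objective: alternative
-- what changed: A is a single fused scan with a comment break, a quote flag, a previous-was-separator flag and a four-way branch mutating an accumulator; B first truncates at the first outside-quote comment char, then slices that prefix token by token with index arithmetic (inner scan to the next outside-quote separator, inner skip loop over the separator run), restarting the quote flag per token and with no separator flag.
-- outside the precondition, e.g. on tokens('a""b', '"', '"', '#'): A returns ['a"', 'b'], B returns ['a', 'b']
import Mathlib
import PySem

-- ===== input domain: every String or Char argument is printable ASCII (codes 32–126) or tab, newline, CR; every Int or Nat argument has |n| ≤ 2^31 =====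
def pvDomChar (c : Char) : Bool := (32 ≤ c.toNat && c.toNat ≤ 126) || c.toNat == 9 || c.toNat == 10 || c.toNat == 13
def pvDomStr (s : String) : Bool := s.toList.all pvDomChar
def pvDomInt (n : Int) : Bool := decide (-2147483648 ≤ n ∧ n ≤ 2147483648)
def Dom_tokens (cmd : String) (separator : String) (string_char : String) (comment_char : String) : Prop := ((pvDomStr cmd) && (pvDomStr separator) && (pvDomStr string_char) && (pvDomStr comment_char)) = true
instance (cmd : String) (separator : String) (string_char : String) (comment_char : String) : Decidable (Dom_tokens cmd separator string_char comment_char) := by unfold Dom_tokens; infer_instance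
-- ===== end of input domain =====

-- B replaces A's single fused flag-machine scan by a comment-truncation pass followed by
-- index/slice tokenization (alternative decomposition, same cost).


-- ===== PORT A =====
-- A's for-loop with `break`, as structural recursion over the characters; tokens are carried
-- as lists of characters and turned into Strings at the end.
def tokensLoopA (sepL scL ccL : List Char) :
    List Char → Bool → Bool → List (List Char) → List Char → List (List Char)
  | [], _, _, l, s => l ++ [s]
  | c :: cs, o, sp, l, s =>
    if [c] = ccL ∧ o = false then l ++ [s]          -- break: return l + [s]
    else if sp = true ∧ o = false ∧ [c] = sepL then  -- pass
      tokensLoopA sepL scL ccL cs o sp l s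
    else
      let o' := if [c] = scL then !o else o
      let sp' : Bool := decide ([c] = sepL)
      let s1 := if o' = true ∧ sp' = true then s ++ [c] else s
      let s2 := if o' = true ∧ sp' = false then s1 ++ [c] else s1
      let p3 := if o' = false ∧ sp' = true then (([] : List Char), l ++ [s2]) else (s2, l)
      let s4 := if o' = false ∧ sp' = false then p3.1 ++ [c] else p3.1
      tokensLoopA sepL scL ccL cs o' sp' p3.2 s4

def tokens (cmd : String) (separator : String) (string_char : String) (comment_char : String) : List String :=
  (tokensLoopA separator.toList string_char.toList comment_char.toList
      cmd.toList false false [] []).map String.mk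

-- ===== PORT B =====
-- pass 1 of Source B: truncate at the first comment_char outside quotes
def truncAtComment (scL ccL : List Char) : List Char → Bool → List Char
  | [], _ => []
  | c :: cs, o =>
    if [c] = ccL ∧ o = false then []
    else c :: truncAtComment scL ccL cs (if [c] = scL then !o else o)

-- pass 2 of Source B, inner scan: chars of the current token (up to the next outside-quote
-- separator) and, if a separator was hit, the remaining characters after it
def scanTok (sepL scL : List Char) : List Char → Bool → List Char × Option (List Char)
  | [], _ => ([], none)
  | c :: cs, o =>
    if [c] = sepL ∧ o = false then ([], some cs)
    else
      let r := scanTok sepL scL cs (if [c] = scL then !o else o)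
      (c :: r.1, r.2)

-- pass 2 of Source B, inner skip loop over the separator run
def skipSeps (sepL : List Char) : List Char → List Char
  | [] => []
  | c :: cs => if [c] = sepL then skipSeps sepL cs else c :: cs

theorem scanTok_rest_lt (sepL scL : List Char) :
    ∀ (cs : List Char) (o : Bool) (r : List Char),
      (scanTok sepL scL cs o).2 = some r → r.length < cs.length := by
  intro cs
  induction cs with
  | nil => intro o r h; simp [scanTok] at h
  | cons c cs ih =>
    intro o r h
    simp only [scanTok] at h
    split at h
    · simp at h; subst h; simp
    · exact Nat.lt_trans (ih _ r h) (by simp)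

theorem skipSeps_length_le (sepL : List Char) :
    ∀ cs : List Char, (skipSeps sepL cs).length ≤ cs.length := by
  intro cs
  induction cs with
  | nil => simp [skipSeps]
  | cons c cs ih =>
    simp only [skipSeps]
    split
    · exact Nat.le_trans ih (by simp)
    · simp

-- pass 2 of Source B, outer while-True loop (recursion on the remaining characters)
def tokensB (sepL scL : List Char) (cs : List Char) : List (List Char) :=
  match h : scanTok sepL scL cs false with
  | (t, none) => [t]
  | (t, some r) => t :: tokensB sepL scL (skipSeps sepL r)
termination_by cs.length
decreasing_by
  exact Nat.lt_of_le_of_lt (skipSeps_length_le sepL r)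
    (scanTok_rest_lt sepL scL cs false r (by rw [h]))

def tokens_alt (cmd : String) (separator : String) (string_char : String) (comment_char : String) : List String :=
  (tokensB separator.toList string_char.toList
      (truncAtComment string_char.toList comment_char.toList cmd.toList false)).map String.mk

-- ===== PRECONDITION & SPEC =====
-- Pre_ excludes only the degenerate configuration in which the separator IS the (single) quote
-- character: there the same character must act both as quote toggle and as separator, A's
-- toggle-before-skip ordering is accidental, and neither behaviour is the one anybody specifies.
def Pre_tokens (cmd : String) (separator : String) (string_char : String) (comment_char : String) : Prop :=
  ¬ (separator = string_char ∧ separator.length = 1)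
instance (cmd : String) (separator : String) (string_char : String) (comment_char : String) : Decidable (Pre_tokens cmd separator string_char comment_char) := by unfold Pre_tokens; infer_instance

def pvWitness_tokens : String × String × String × String := ("ab \"c d\" e #x", " ", "\"", "#")

def Spec_tokens (cmd : String) (separator : String) (string_char : String) (comment_char : String) (out : List String) : Prop := out = tokens_alt cmd separator string_char comment_char
instance (cmd : String) (separator : String) (string_char : String) (comment_char : String) (out : List String) : Decidable (Spec_tokens cmd separator string_char comment_char out) := by unfold Spec_tokens; infer_instance

-- ===== CLAIM (what is proved, stated in full; the proofs are below) =====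
def Claim_equal_tokens : Prop := ∀ (cmd : String) (separator : String) (string_char : String) (comment_char : String), Dom_tokens cmd separator string_char comment_char → Pre_tokens cmd separator string_char comment_char → Spec_tokens cmd separator string_char comment_char (tokens cmd separator string_char comment_char)

-- ===== LEMMAS AND PROOFS =====

-- A's loop without the comment branch (proof helper)
def loopA' (sepL scL : List Char) :
    List Char → Bool → Bool → List (List Char) → List Char → List (List Char)
  | [], _, _, l, s => l ++ [s]
  | c :: cs, o, sp, l, s =>
    if sp = true ∧ o = false ∧ [c] = sepL then
      loopA' sepL scL cs o sp l s
    else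
      let o' := if [c] = scL then !o else o
      let sp' : Bool := decide ([c] = sepL)
      let s1 := if o' = true ∧ sp' = true then s ++ [c] else s
      let s2 := if o' = true ∧ sp' = false then s1 ++ [c] else s1
      let p3 := if o' = false ∧ sp' = true then (([] : List Char), l ++ [s2]) else (s2, l)
      let s4 := if o' = false ∧ sp' = false then p3.1 ++ [c] else p3.1
      loopA' sepL scL cs o' sp' p3.2 s4

-- scanTok generalized over the initial quote state, one layer (proof helper)
def tokensB' (sepL scL : List Char) (cs : List Char) (o : Bool) : List (List Char) :=
  match scanTok sepL scL cs o with
  | (t, none) => [t]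
  | (t, some r) => t :: tokensB sepL scL (skipSeps sepL r)

def consHead (s : List Char) : List (List Char) → List (List Char)
  | [] => [s]
  | t :: ts => (s ++ t) :: ts

-- small unfolding lemmas (stated with explicit hypotheses so that rewriting
-- never touches the character lists themselves)
theorem loopA'_skip (sepL scL : List Char) (c : Char) (cs : List Char) (o sp : Bool)
    (l : List (List Char)) (s : List Char) (h : sp = true ∧ o = false ∧ [c] = sepL) :
    loopA' sepL scL (c :: cs) o sp l s = loopA' sepL scL cs o sp l s := by
  simp only [loopA', if_pos h]

theorem loopA'_cons (sepL scL : List Char) (c : Char) (cs : List Char) (o sp : Bool)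
    (l : List (List Char)) (s : List Char)
    (hskip : ¬ (sp = true ∧ o = false ∧ [c] = sepL)) :
    loopA' sepL scL (c :: cs) o sp l s =
      (if (if [c] = scL then !o else o) = true then
        loopA' sepL scL cs (if [c] = scL then !o else o) (decide ([c] = sepL)) l (s ++ [c])
      else if decide ([c] = sepL) = true then
        loopA' sepL scL cs (if [c] = scL then !o else o) (decide ([c] = sepL)) (l ++ [s]) []
      else
        loopA' sepL scL cs (if [c] = scL then !o else o) (decide ([c] = sepL)) l (s ++ [c])) := by
  simp only [loopA', if_neg hskip]
  cases ho : (if [c] = scL then !o else o) <;> cases hsp : decide ([c] = sepL) <;>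
    simp [ho, hsp]

theorem scanTok_cons_flush (sepL scL : List Char) (c : Char) (cs : List Char) (o : Bool)
    (h : [c] = sepL ∧ o = false) :
    scanTok sepL scL (c :: cs) o = ([], some cs) := by
  simp only [scanTok, if_pos h]

theorem scanTok_cons_step (sepL scL : List Char) (c : Char) (cs : List Char) (o : Bool)
    (h : ¬ ([c] = sepL ∧ o = false)) :
    scanTok sepL scL (c :: cs) o =
      (c :: (scanTok sepL scL cs (if [c] = scL then !o else o)).1,
        (scanTok sepL scL cs (if [c] = scL then !o else o)).2) := by
  simp only [scanTok, if_neg h]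

theorem tokensB_unfold (sepL scL cs : List Char) :
    tokensB sepL scL cs =
      (match scanTok sepL scL cs false with
      | (t, none) => [t]
      | (t, some r) => t :: tokensB sepL scL (skipSeps sepL r)) := by
  rw [tokensB]
  split
  · next t heq => rw [heq]
  · next t r heq => rw [heq]

theorem tokensB_eq_tokensB' (sepL scL cs : List Char) :
    tokensB sepL scL cs = tokensB' sepL scL cs false := by
  rw [tokensB_unfold, tokensB']

theorem tokensB_nil (sepL scL : List Char) : tokensB sepL scL [] = [[]] := by
  rw [tokensB_unfold]
  simp [scanTok]

theorem tokensB_ne_nil (sepL scL cs : List Char) : tokensB sepL scL cs ≠ [] := by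
  rw [tokensB_unfold]
  cases h : scanTok sepL scL cs false with
  | mk t r => cases r <;> simp

theorem tokensB'_ne_nil (sepL scL cs : List Char) (o : Bool) : tokensB' sepL scL cs o ≠ [] := by
  rw [tokensB']
  cases h : scanTok sepL scL cs o with
  | mk t r => cases r <;> simp

theorem skipSeps_cons_pos (sepL : List Char) (c : Char) (cs : List Char) (h : [c] = sepL) :
    skipSeps sepL (c :: cs) = skipSeps sepL cs := by
  simp only [skipSeps, if_pos h]

theorem skipSeps_cons_neg (sepL : List Char) (c : Char) (cs : List Char) (h : ¬ [c] = sepL) :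
    skipSeps sepL (c :: cs) = c :: cs := by
  simp only [skipSeps, if_neg h]

-- fusing the comment break of A into the truncation pass of B
theorem loopA_trunc (sepL scL ccL : List Char)
    (hss : ∀ c : Char, [c] = sepL → [c] ≠ scL) :
    ∀ (cs : List Char) (o sp : Bool) (l : List (List Char)) (s : List Char),
      tokensLoopA sepL scL ccL cs o sp l s
        = loopA' sepL scL (truncAtComment scL ccL cs o) o sp l s := by
  intro cs
  induction cs with
  | nil => intro o sp l s; simp [tokensLoopA, truncAtComment, loopA']
  | cons c cs ih =>
    intro o sp l s
    by_cases hc : [c] = ccL ∧ o = false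
    · simp only [tokensLoopA, truncAtComment, if_pos hc, loopA']
    · simp only [tokensLoopA, truncAtComment, if_neg hc]
      by_cases hskip : sp = true ∧ o = false ∧ [c] = sepL
      · have ho : (if [c] = scL then !o else o) = o := by
          rw [if_neg (hss c hskip.2.2)]
        rw [if_pos hskip, loopA'_skip sepL scL c _ o sp l s hskip, ho, ih]
      · rw [if_neg hskip, loopA'_cons sepL scL c _ o sp l s hskip]
        cases ho : (if [c] = scL then !o else o) <;> cases hsp : decide ([c] = sepL) <;>
          simp [ho, hsp, ih]

-- when the quote is open, A never reads the separator flag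
theorem loopA'_open_sp (sepL scL : List Char) :
    ∀ (cs : List Char) (sp sp' : Bool) (l : List (List Char)) (s : List Char),
      loopA' sepL scL cs true sp l s = loopA' sepL scL cs true sp' l s := by
  intro cs sp sp' l s
  cases cs with
  | nil => simp [loopA']
  | cons c cs => simp [loopA']

-- the core invariant: A's accumulator loop computes B's token slices
theorem loopA'_eq_tokensB (sepL scL : List Char)
    (hss : ∀ c : Char, [c] = sepL → [c] ≠ scL) :
    ∀ (n : ℕ) (cs : List Char), cs.length ≤ n →
      (∀ (o : Bool) (l : List (List Char)) (s : List Char),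
          loopA' sepL scL cs o false l s = l ++ consHead s (tokensB' sepL scL cs o)) ∧
      (∀ l : List (List Char),
          loopA' sepL scL cs false true l [] = l ++ tokensB sepL scL (skipSeps sepL cs)) := by
  intro n
  induction n with
  | zero =>
    intro cs hlen
    have hnil : cs = [] := List.eq_nil_of_length_eq_zero (Nat.le_zero.mp hlen)
    subst hnil
    constructor
    · intro o l s
      simp [loopA', tokensB', scanTok, consHead]
    · intro l
      simp [loopA', skipSeps, tokensB_nil]
  | succ n ih =>
    have hL1 : ∀ cs : List Char, cs.length ≤ n + 1 →
        ∀ (o : Bool) (l : List (List Char)) (s : List Char),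
          loopA' sepL scL cs o false l s = l ++ consHead s (tokensB' sepL scL cs o) := by
      intro cs hlen o l s
      cases cs with
      | nil => simp [loopA', tokensB', scanTok, consHead]
      | cons c cs =>
        have hlen' : cs.length ≤ n := by simpa using hlen
        by_cases hsep : [c] = sepL ∧ o = false
        · -- flush: A pushes s and enters skip mode; B closes the token here
          have hcs : ¬ [c] = scL := hss c hsep.1
          have ho : (if [c] = scL then !o else o) = false := by
            rw [if_neg hcs, hsep.2]
          have hd : decide ([c] = sepL) = true := decide_eq_true hsep.1
          rw [loopA'_cons sepL scL c cs o false l s (by simp),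
            ho, hd]
          simp only [Bool.false_eq_true, if_false, if_true]
          rw [(ih cs hlen').2 (l ++ [s])]
          rw [tokensB', scanTok_cons_flush sepL scL c cs o hsep]
          simp [consHead]
        · -- ordinary character: both sides append c to the current token
          have hnotflush : ¬ ((if [c] = scL then !o else o) = false ∧ decide ([c] = sepL) = true) := by
            rintro ⟨h1, h2⟩
            have hsp : [c] = sepL := of_decide_eq_true h2
            have hcs : ¬ [c] = scL := hss c hsp
            rw [if_neg hcs] at h1
            exact hsep ⟨hsp, h1⟩
          have hrec : loopA' sepL scL (c :: cs) o false l s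
              = loopA' sepL scL cs (if [c] = scL then !o else o) (decide ([c] = sepL)) l
                  (s ++ [c]) := by
            rw [loopA'_cons sepL scL c cs o false l s (by simp)]
            cases ho : (if [c] = scL then !o else o) with
            | true => simp
            | false =>
              have hd : decide ([c] = sepL) = false := by
                cases hd : decide ([c] = sepL) with
                | false => rfl
                | true => exact absurd ⟨ho, hd⟩ hnotflush
              simp [ho, hd]
          have hsp0 : loopA' sepL scL cs (if [c] = scL then !o else o) (decide ([c] = sepL)) l
                  (s ++ [c])
              = loopA' sepL scL cs (if [c] = scL then !o else o) false l (s ++ [c]) := by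
            cases hd : decide ([c] = sepL) with
            | false => rfl
            | true =>
              have ho : (if [c] = scL then !o else o) = true := by
                cases ho : (if [c] = scL then !o else o) with
                | true => rfl
                | false => exact absurd ⟨ho, hd⟩ hnotflush
              rw [ho]
              exact loopA'_open_sp sepL scL cs _ _ l (s ++ [c])
          rw [hrec, hsp0, (ih cs hlen').1 _ l (s ++ [c])]
          -- relate B's scan on c :: cs with its scan on cs
          rw [tokensB', tokensB',
            scanTok_cons_step sepL scL c cs o hsep]
          cases hr : scanTok sepL scL cs (if [c] = scL then !o else o) with
          | mk t r => cases r <;> simp [consHead]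
    intro cs hlen
    refine ⟨hL1 cs hlen, ?_⟩
    intro l
    cases cs with
    | nil => simp [loopA', skipSeps, tokensB_nil]
    | cons c cs =>
      have hlen' : cs.length ≤ n := by simpa using hlen
      by_cases hsp : [c] = sepL
      · -- still in the separator run: A skips, B's skip loop drops c
        rw [loopA'_skip sepL scL c cs false true l [] ⟨rfl, rfl, hsp⟩,
          (ih cs hlen').2 l, skipSeps_cons_pos sepL c cs hsp]
      · -- run over: from here the skip flag is irrelevant
        have hstep : loopA' sepL scL (c :: cs) false true l []
            = loopA' sepL scL (c :: cs) false false l [] := by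
          rw [loopA'_cons sepL scL c cs false true l [] (by simp [hsp]),
            loopA'_cons sepL scL c cs false false l [] (by simp)]
        rw [hstep, hL1 (c :: cs) hlen false l [], skipSeps_cons_neg sepL c cs hsp,
          ← tokensB_eq_tokensB']
        cases htb : tokensB sepL scL (c :: cs) with
        | nil => exact absurd htb (tokensB_ne_nil sepL scL (c :: cs))
        | cons t ts => simp [consHead]

-- ===== VERDICT (by name: the statement is the Claim_ definition above) =====
theorem tokens_spec : Claim_equal_tokens := by
  intro cmd separator string_char comment_char _hdom hpre
  unfold Spec_tokens tokens tokens_alt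
  have hss : ∀ c : Char, [c] = separator.toList → [c] ≠ string_char.toList := by
    intro c h1 h2
    apply hpre
    constructor
    · exact String.toList_inj.mp (by rw [← h1, h2])
    · rw [← String.length_toList, ← h1]
      rfl
  rw [loopA_trunc separator.toList string_char.toList comment_char.toList hss]
  rw [(loopA'_eq_tokensB separator.toList string_char.toList hss
      (truncAtComment string_char.toList comment_char.toList cmd.toList false).length
      _ le_rfl).1 false [] []]
  rw [tokensB_eq_tokensB']
  cases htb : tokensB' separator.toList string_char.toList
      (truncAtComment string_char.toList comment_char.toList cmd.toList false) false with
  | nil => exact absurd htb (tokensB'_ne_nil _ _ _ _)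
  | cons t ts => simp [consHead]
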